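-- pv_equiv track=rewrite | github.com/Walavouchey/osu-wiki-tools | wikitools_cli/commands/update_originals.py | mode_icon
-- ===== SOURCE A (Python) =====
-- def mode_icon(mode: str) -> str:
--     split = mode.split(", ")
--     if len(split) > 1:
--         return " ".join(mode_icon(m) for m in split)
--     match mode:
--         case "osu":
--             return "![](/wiki/shared/mode/osu.png)"
--         case "taiko":
--             return "![](/wiki/shared/mode/taiko.png)"
--         case "catch":
--             return "![](/wiki/shared/mode/catch.png)"
--         case "mania":
--             return "![](/wiki/shared/mode/mania.png)"
--         case _:
--             return ""
-- ===== SOURCE B (Python) =====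
-- _ICONS = {
--     "osu": "![](/wiki/shared/mode/osu.png)",
--     "taiko": "![](/wiki/shared/mode/taiko.png)",
--     "catch": "![](/wiki/shared/mode/catch.png)",
--     "mania": "![](/wiki/shared/mode/mania.png)",
-- }
--
--
-- def mode_icon(mode: str) -> str:
--     # One left-to-right character scan: no split(), no join(), no recursion.
--     # The output is built directly while the two-character separator is recognised in place.
--     res = ""
--     cur = ""
--     i = 0
--     n = len(mode)
--     while i < n:
--         if mode[i] == "," and i + 1 < n and mode[i + 1] == " ":
--             res += _ICONS.get(cur, "") + " "
--             cur = ""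
--             i += 2
--         else:
--             cur += mode[i]
--             i += 1
--     return res + _ICONS.get(cur, "")
-- ===== Notes on version B (the rewrite author's own statement) =====
-- stated objective: alternative
-- what changed: A's split-then-recurse-then-match pipeline (a separator split, a one-level self-recursion and a 5-way match per token) is replaced by a single left-to-right character scan with two string accumulators that recognises the two-character separator in place and appends each token's icon to the output as it is completed; no split, no join, no recursion.
import Mathlib
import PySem

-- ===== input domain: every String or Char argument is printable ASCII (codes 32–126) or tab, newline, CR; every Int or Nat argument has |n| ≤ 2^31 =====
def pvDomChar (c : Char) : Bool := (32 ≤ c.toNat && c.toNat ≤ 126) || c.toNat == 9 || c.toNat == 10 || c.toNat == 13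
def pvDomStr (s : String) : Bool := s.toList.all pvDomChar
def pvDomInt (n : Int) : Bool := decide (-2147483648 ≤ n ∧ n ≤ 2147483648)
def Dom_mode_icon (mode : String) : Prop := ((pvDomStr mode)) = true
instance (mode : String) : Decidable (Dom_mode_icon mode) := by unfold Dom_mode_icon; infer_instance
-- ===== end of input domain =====

-- B replaces A's split + one-level self-recursion + 5-way match by one left-to-right
-- character scan that recognises ", " in place and builds the output directly (objective: alternative).

-- ===== PORT A =====
-- A is self-recursive; the fuel argument (started at |mode| + 1, far more than Python's
-- actual recursion depth of ≤ 2) only makes that recursion structural, it never changes the result.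
def modeIconGo : Nat → String → String
  | 0, _ => ""
  | fuel + 1, mode =>
    let split := (PySem.Str.split? mode ", ").getD []   -- ", " ≠ "" so split? is always `some`
    if split.length > 1 then
      PySem.Str.join " " (split.map (modeIconGo fuel))
    else
      match mode with
      | "osu" => "![](/wiki/shared/mode/osu.png)"
      | "taiko" => "![](/wiki/shared/mode/taiko.png)"
      | "catch" => "![](/wiki/shared/mode/catch.png)"
      | "mania" => "![](/wiki/shared/mode/mania.png)"
      | _ => ""

def mode_icon (mode : String) : String := modeIconGo (mode.toList.length + 1) mode

-- ===== PORT B =====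
def pvIcons : PySem.Dict String String :=
  ⟨[("osu", "![](/wiki/shared/mode/osu.png)"),
    ("taiko", "![](/wiki/shared/mode/taiko.png)"),
    ("catch", "![](/wiki/shared/mode/catch.png)"),
    ("mania", "![](/wiki/shared/mode/mania.png)")]⟩

-- _ICONS.get(cur, "")  (strings carried as List Char so the kernel can unfold concatenation)
def icoChars (cur : List Char) : List Char :=
  (PySem.Dict.getD pvIcons (String.ofList cur) "").toList

-- the while loop of Source B: first list = the unread input mode[i:], cur/res = Source B's cur/res
def modeIconScan : List Char → List Char → List Char → String
  | [], cur, res => String.ofList (res ++ icoChars cur)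
  | c :: rest, cur, res =>
    match rest with
    | d :: rest' =>
      if c = ',' ∧ d = ' ' then modeIconScan rest' [] (res ++ icoChars cur ++ [' '])
      else modeIconScan (d :: rest') (cur ++ [c]) res
    | [] => modeIconScan [] (cur ++ [c]) res
  termination_by l _ _ => l.length
  decreasing_by all_goals simp

def mode_icon_alt (mode : String) : String := modeIconScan mode.toList [] []

-- ===== PRECONDITION & SPEC =====
def Spec_mode_icon (mode : String) (out : String) : Prop := out = mode_icon_alt mode
instance (mode : String) (out : String) : Decidable (Spec_mode_icon mode out) := by unfold Spec_mode_icon; infer_instance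

-- ===== CLAIM (what is proved, stated in full; the proofs are below) =====
def Claim_equal_mode_icon : Prop := ∀ (mode : String), Dom_mode_icon mode → Spec_mode_icon mode (mode_icon mode)

-- ===== LEMMAS AND PROOFS =====

-- both sides are shown equal to this: icons of the ", "-split pieces, joined by " "
def pvJoined (mode : String) : String :=
  PySem.Str.join " "
    ((PySem.Chars.splitOn mode.toList [',', ' ']).map
      (fun p => PySem.Dict.getD pvIcons (String.ofList p) ""))

-- splitOn.go always yields at least |acc| + 1 pieces
theorem pv_go_len (sep : List Char) :
    ∀ (fuel : Nat) (l cur : List Char) (acc : List (List Char)),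
      acc.length + 1 ≤ (PySem.Chars.splitOn.go sep fuel l cur acc).length := by
  intro fuel
  induction fuel with
  | zero =>
    intro l cur acc
    simp [PySem.Chars.splitOn.go]
  | succ n ih =>
    intro l cur acc
    cases l with
    | nil => simp [PySem.Chars.splitOn.go]
    | cons c rest =>
      simp only [PySem.Chars.splitOn.go]
      split
      · have h := ih (List.drop sep.length (c :: rest)) [] (cur.reverse :: acc)
        simp at h; omega
      · exact ih rest (c :: cur) acc

-- the accumulator only prepends finished pieces
theorem pv_go_acc (sep : List Char) :
    ∀ (fuel : Nat) (l cur : List Char) (acc : List (List Char)),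
      PySem.Chars.splitOn.go sep fuel l cur acc =
        acc.reverse ++ PySem.Chars.splitOn.go sep fuel l cur [] := by
  intro fuel
  induction fuel with
  | zero =>
    intro l cur acc
    simp [PySem.Chars.splitOn.go]
  | succ n ih =>
    intro l cur acc
    cases l with
    | nil => simp [PySem.Chars.splitOn.go]
    | cons c rest =>
      simp only [PySem.Chars.splitOn.go]
      split
      · rw [ih (List.drop sep.length (c :: rest)) [] (cur.reverse :: acc),
            ih (List.drop sep.length (c :: rest)) [] ([cur.reverse])]
        simp
      · exact ih rest (c :: cur) acc

-- when the scan never finds sep, the result is a single remaining piece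
theorem pv_go_not_infix (sep : List Char) :
    ∀ (fuel : Nat) (l cur : List Char) (acc : List (List Char)),
      ¬ sep <:+: l →
      PySem.Chars.splitOn.go sep fuel l cur acc = acc.reverse ++ [cur.reverse ++ l] := by
  intro fuel
  induction fuel with
  | zero =>
    intro l cur acc _h
    simp [PySem.Chars.splitOn.go]
  | succ n ih =>
    intro l cur acc h
    cases l with
    | nil => simp [PySem.Chars.splitOn.go]
    | cons c rest =>
      simp only [PySem.Chars.splitOn.go]
      split
      · rename_i hpre
        exact absurd ((List.isPrefixOf_iff_prefix.mp hpre).isInfix) h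
      · have := ih rest (c :: cur) acc (fun hin => h (hin.trans (List.suffix_cons c rest).isInfix))
        simpa using this

-- a one-piece result means the scan never cut: the piece is everything
theorem pv_go_singleton (sep : List Char) :
    ∀ (fuel : Nat) (l cur : List Char) (acc : List (List Char)),
      (PySem.Chars.splitOn.go sep fuel l cur acc).length = acc.length + 1 →
      PySem.Chars.splitOn.go sep fuel l cur acc = acc.reverse ++ [cur.reverse ++ l] := by
  intro fuel
  induction fuel with
  | zero =>
    intro l cur acc _h
    simp [PySem.Chars.splitOn.go]
  | succ n ih =>
    intro l cur acc h
    cases l with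
    | nil => simp [PySem.Chars.splitOn.go]
    | cons c rest =>
      by_cases hpre : sep.isPrefixOf (c :: rest) = true
      · exfalso
        simp only [PySem.Chars.splitOn.go] at h
        rw [if_pos hpre] at h
        have hge := pv_go_len sep n (List.drop sep.length (c :: rest)) [] (cur.reverse :: acc)
        simp only [List.length_cons] at hge
        omega
      · simp only [PySem.Chars.splitOn.go] at h ⊢
        rw [if_neg hpre] at h ⊢
        have := ih rest (c :: cur) acc h
        simpa using this

-- no occurrence of sep starts inside the already-scanned region cur
theorem pv_cur_no_infix (sep : List Char) (hsep : sep ≠ []) (cur l : List Char)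
    (H : ∀ i < cur.length, ¬ sep <+: (cur.reverse ++ l).drop i) :
    ¬ sep <:+: cur.reverse := by
  intro hin
  obtain ⟨j, hj⟩ := (PySem.Chars.exists_prefix_drop_iff_isIn sep cur.reverse).mpr
    ((PySem.Chars.isIn_iff_infix sep cur.reverse).mpr hin)
  have hjlt : j < cur.length := by
    by_contra hge
    have : List.drop j cur.reverse = [] := by
      apply List.drop_eq_nil_of_le
      simpa using Nat.le_of_not_lt hge
    rw [this] at hj
    exact hsep (List.prefix_nil.mp hj)
  apply H j hjlt
  rw [List.drop_append_of_le_length (by simpa using Nat.le_of_lt hjlt)]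
  exact hj.trans (List.prefix_append _ _)

-- no emitted piece contains sep
theorem pv_go_no_sep (sep : List Char) (hsep : sep ≠ []) :
    ∀ (fuel : Nat) (l cur : List Char) (acc : List (List Char)),
      l.length ≤ fuel →
      (∀ i < cur.length, ¬ sep <+: (cur.reverse ++ l).drop i) →
      (∀ p ∈ acc, ¬ sep <:+: p) →
      ∀ p ∈ PySem.Chars.splitOn.go sep fuel l cur acc, ¬ sep <:+: p := by
  intro fuel
  induction fuel with
  | zero =>
    intro l cur acc hf H Hacc p hp
    have hl : l = [] := List.length_eq_zero_iff.mp (Nat.le_zero.mp hf)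
    subst hl
    simp [PySem.Chars.splitOn.go] at hp
    rcases hp with h | h
    · exact Hacc p h
    · subst h; exact pv_cur_no_infix sep hsep cur [] H
  | succ n ih =>
    intro l cur acc hf H Hacc p hp
    cases l with
    | nil =>
      simp [PySem.Chars.splitOn.go] at hp
      rcases hp with h | h
      · exact Hacc p h
      · subst h; exact pv_cur_no_infix sep hsep cur [] H
    | cons c rest =>
      simp only [PySem.Chars.splitOn.go] at hp
      by_cases hpre : sep.isPrefixOf (c :: rest) = true
      · rw [if_pos hpre] at hp
        refine ih (List.drop sep.length (c :: rest)) [] (cur.reverse :: acc) ?_ (by simp) ?_ p hp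
        · have h1 : 1 ≤ sep.length := by
            cases sep with
            | nil => exact absurd rfl hsep
            | cons a t => simp
          simp only [List.length_drop, List.length_cons] at *
          omega
        · intro q hq
          rcases List.mem_cons.mp hq with h | h
          · subst h; exact pv_cur_no_infix sep hsep cur (c :: rest) H
          · exact Hacc q h
      · rw [if_neg hpre] at hp
        refine ih rest (c :: cur) acc (by simp at hf ⊢; omega) ?_ Hacc p hp
        intro i hi
        have hshape : (c :: cur).reverse ++ rest = cur.reverse ++ (c :: rest) := by simp
        rw [hshape]
        simp only [List.length_cons] at hi
        rcases Nat.lt_or_ge i cur.length with hlt | hge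
        · exact H i hlt
        · have hieq : i = cur.length := by omega
          subst hieq
          have : List.drop cur.length (cur.reverse ++ (c :: rest)) = c :: rest := by
            have h0 := List.drop_left (l₁ := cur.reverse) (l₂ := (c :: rest))
            simp only [List.length_reverse] at h0
            exact h0
          rw [this]
          exact fun hpref => hpre (List.isPrefixOf_iff_prefix.mpr hpref)

-- specializations to splitOn with sep = [',', ' ']
theorem pv_split_pieces (s : List Char) :
    ∀ p ∈ PySem.Chars.splitOn s [',', ' '], ¬ [',', ' '] <:+: p := by
  intro p hp
  exact pv_go_no_sep [',', ' '] (by decide) (s.length + 1) s [] []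
    (by omega) (by simp) (by simp) p hp

theorem pv_split_len (s : List Char) : 1 ≤ (PySem.Chars.splitOn s [',', ' ']).length := by
  have := pv_go_len [',', ' '] (s.length + 1) s [] []
  simpa [PySem.Chars.splitOn] using this

theorem pv_split_single (s : List Char)
    (h : (PySem.Chars.splitOn s [',', ' ']).length = 1) :
    PySem.Chars.splitOn s [',', ' '] = [s] := by
  have := pv_go_singleton [',', ' '] (s.length + 1) s [] [] (by simpa [PySem.Chars.splitOn] using h)
  simpa [PySem.Chars.splitOn] using this

theorem pv_split_not_infix (s : List Char) (h : ¬ [',', ' '] <:+: s) :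
    PySem.Chars.splitOn s [',', ' '] = [s] := by
  have := pv_go_not_infix [',', ' '] (s.length + 1) s [] [] h
  simpa [PySem.Chars.splitOn] using this

theorem pv_comma_toList : (", " : String).toList = [',', ' '] := by decide

theorem pv_split?_eq (m : String) :
    PySem.Str.split? m ", " =
      some ((PySem.Chars.splitOn m.toList [',', ' ']).map String.ofList) := by
  simp [PySem.Str.split?, PySem.Chars.split?, pv_comma_toList]

theorem pv_str_join_singleton (sep : String) (x : String) :
    PySem.Str.join sep [x] = x := by
  simp [PySem.Str.join, PySem.Chars.join_singleton, String.ofList_toList]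

-- on a string that does not contain ", ", A's recursive worker returns the table value
theorem pv_go_base (fuel : Nat) (m : String) (hm : ¬ [',', ' '] <:+: m.toList) :
    modeIconGo (fuel + 1) m = PySem.Dict.getD pvIcons m "" := by
  have hsplit := pv_split_not_infix m.toList hm
  simp only [modeIconGo, pv_split?_eq, Option.getD_some, hsplit, List.map_cons, List.map_nil,
    List.length_cons, List.length_nil]
  rw [if_neg (by omega)]
  split
  · decide
  · decide
  · decide
  · decide
  · rename_i h1 h2 h3 h4
    have e1 : ("osu" == m) = false := beq_eq_false_iff_ne.mpr (fun h => h1 h.symm)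
    have e2 : ("taiko" == m) = false := beq_eq_false_iff_ne.mpr (fun h => h2 h.symm)
    have e3 : ("catch" == m) = false := beq_eq_false_iff_ne.mpr (fun h => h3 h.symm)
    have e4 : ("mania" == m) = false := beq_eq_false_iff_ne.mpr (fun h => h4 h.symm)
    simp [pvIcons, PySem.Dict.getD, PySem.Dict.get?, List.find?, e1, e2, e3, e4]

-- A equals the joined-icons reference value
theorem pv_key (mode : String) : mode_icon mode = pvJoined mode := by
  unfold mode_icon pvJoined
  by_cases hgt : (PySem.Chars.splitOn mode.toList [',', ' ']).length > 1
  · have hinf : ([',', ' '] : List Char) <:+: mode.toList := by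
      by_contra h
      rw [pv_split_not_infix mode.toList h] at hgt
      simp at hgt
    have hlen : 1 ≤ mode.toList.length := by
      have := hinf.length_le
      simp only [List.length_cons, List.length_nil] at this
      omega
    obtain ⟨k, hk⟩ : ∃ k, mode.toList.length = k + 1 := ⟨mode.toList.length - 1, by omega⟩
    rw [hk]
    simp only [modeIconGo, pv_split?_eq, Option.getD_some]
    rw [if_pos (by simpa using hgt)]
    congr 1
    rw [List.map_map]
    apply List.map_congr_left
    intro p hp
    have hnp := pv_split_pieces mode.toList p hp
    simp only [Function.comp_apply]
    exact pv_go_base k (String.ofList p) (by simpa [String.toList_ofList] using hnp)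
  · have h1 : (PySem.Chars.splitOn mode.toList [',', ' ']).length = 1 := by
      have := pv_split_len mode.toList
      omega
    have hsingle := pv_split_single mode.toList h1
    have hm : ¬ [',', ' '] <:+: mode.toList := by
      apply pv_split_pieces mode.toList
      rw [hsingle]; simp
    rw [hsingle]
    simp only [List.map_cons, List.map_nil]
    rw [pv_str_join_singleton]
    rw [String.ofList_toList]
    exact pv_go_base mode.toList.length mode hm

-- B's scanner computes the same joined-icons value: the scanner's state (l, cur, res)
-- tracks splitOn.go's state (l, cur.reverse, emitted pieces already rendered into res)
theorem pv_scan :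
    ∀ (fuel : Nat) (l cur res : List Char), l.length ≤ fuel →
      modeIconScan l cur res =
        String.ofList (res ++ PySem.Chars.join [' ']
          ((PySem.Chars.splitOn.go [',', ' '] fuel l cur.reverse []).map
            (fun p => icoChars p))) := by
  intro fuel
  induction fuel with
  | zero =>
    intro l cur res hf
    have hl : l = [] := List.length_eq_zero_iff.mp (Nat.le_zero.mp hf)
    subst hl
    simp [modeIconScan, PySem.Chars.splitOn.go, PySem.Chars.join_singleton, String.ofList]
  | succ n ih =>
    intro l cur res hf
    cases l with
    | nil =>
      simp [modeIconScan, PySem.Chars.splitOn.go, PySem.Chars.join_singleton, String.ofList]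
    | cons c rest =>
      cases rest with
      | nil =>
        -- one char left: never the 2-char separator
        have hpre : ([',', ' '] : List Char).isPrefixOf [c] = false := by
          simp [List.isPrefixOf]
        rw [show modeIconScan [c] cur res = modeIconScan [] (cur ++ [c]) res by simp [modeIconScan]]
        rw [ih [] (cur ++ [c]) res (by simp)]
        simp only [PySem.Chars.splitOn.go, hpre, Bool.false_eq_true, if_false]
        simp
      | cons d rest' =>
        by_cases hsep : c = ',' ∧ d = ' '
        · obtain ⟨hc, hd⟩ := hsep
          subst hc; subst hd
          -- separator found: both machines cut here
          have hpre : ([',', ' '] : List Char).isPrefixOf (',' :: ' ' :: rest') = true := by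
            simp [List.isPrefixOf]
          rw [show modeIconScan (',' :: ' ' :: rest') cur res =
                modeIconScan rest' [] (res ++ icoChars cur ++ [' ']) by
            simp [modeIconScan]]
          rw [ih rest' [] (res ++ icoChars cur ++ [' ']) (by simp at hf ⊢; omega)]
          simp only [PySem.Chars.splitOn.go, hpre]
          rw [pv_go_acc [',', ' '] n (List.drop ([',', ' '] : List Char).length (',' :: ' ' :: rest'))
            [] [cur.reverse.reverse]]
          have hdrop : List.drop ([',', ' '] : List Char).length (',' :: ' ' :: rest') = rest' := by
            simp
          rw [hdrop]
          obtain ⟨q, qs, hq⟩ :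
              ∃ q qs, PySem.Chars.splitOn.go [',', ' '] n rest' [] [] = q :: qs := by
            have := pv_go_len [',', ' '] n rest' [] []
            cases hgo : PySem.Chars.splitOn.go [',', ' '] n rest' [] [] with
            | nil => rw [hgo] at this; simp at this
            | cons q qs => exact ⟨q, qs, rfl⟩
          rw [hq]
          simp [PySem.Chars.join_cons_cons, hq]
        · have hpre : ([',', ' '] : List Char).isPrefixOf (c :: d :: rest') = false := by
            simp only [List.isPrefixOf]
            by_cases hc : c = ','
            · subst hc
              have hd : ¬ d = ' ' := fun h => hsep ⟨rfl, h⟩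
              have e : (' ' == d) = false := beq_eq_false_iff_ne.mpr (fun h => hd h.symm)
              simp [e]
            · have e : (',' == c) = false := beq_eq_false_iff_ne.mpr (fun h => hc h.symm)
              simp [e]
          rw [show modeIconScan (c :: d :: rest') cur res =
                modeIconScan (d :: rest') (cur ++ [c]) res by
            simp [modeIconScan, hsep]]
          rw [ih (d :: rest') (cur ++ [c]) res (by simp at hf ⊢; omega)]
          simp only [PySem.Chars.splitOn.go, hpre, Bool.false_eq_true, if_false]
          simp

theorem pv_alt (mode : String) : mode_icon_alt mode = pvJoined mode := by
  unfold mode_icon_alt pvJoined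
  rw [pv_scan (mode.toList.length + 1) mode.toList [] [] (by omega)]
  simp only [List.reverse_nil, List.nil_append]
  rw [show PySem.Chars.splitOn.go [',', ' '] (mode.toList.length + 1) mode.toList [] [] =
        PySem.Chars.splitOn mode.toList [',', ' '] from rfl]
  have h : (PySem.Str.join " "
      ((PySem.Chars.splitOn mode.toList [',', ' ']).map
        (fun p => PySem.Dict.getD pvIcons (String.ofList p) ""))).toList =
      PySem.Chars.join [' ']
        ((PySem.Chars.splitOn mode.toList [',', ' ']).map (fun p => icoChars p)) := by
    rw [PySem.Str.toList_join]
    simp [icoChars, List.map_map, Function.comp_def,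
      show (" " : String).toList = [' '] from by decide]
  rw [← h, String.ofList_toList]

-- ===== VERDICT (by name: the statement is the Claim_ definition above) =====
theorem mode_icon_spec : Claim_equal_mode_icon := by
  intro mode _hdom
  unfold Spec_mode_icon
  rw [pv_key mode, pv_alt mode]
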